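-- pv_equiv track=rewrite | github.com/erikdelbom/advent-of-code | 2022/17/solution.py | horizontal_collision
-- ===== SOURCE A (Python) =====
-- def horizontal_collision(placed_rocks, falling_rock, direction):
--     wall = 1 if direction == -1 else 7
--     for block in falling_rock:
--         if block[0] == wall:
--             return True
--
--     for rock in placed_rocks:
--         for block in rock:
--             for falling_block in falling_rock:
--                 if block[1] == falling_block[1] and block[0] == falling_block[0]+direction:
--                     return True
--     return False
-- ===== SOURCE B (Python) =====
-- def horizontal_collision(placed_rocks, falling_rock, direction):
--     wall = 1 if direction == -1 else 7
--     if wall in {fb[0] for fb in falling_rock}: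
--         return True
--     shifted = {(fb[0] + direction, fb[1]) for fb in falling_rock}
--     occupied = {(b[0], b[1]) for rock in placed_rocks for b in rock}
--     return not shifted.isdisjoint(occupied)
-- ===== Notes on version B (the rewrite author's own statement) =====
-- stated objective: alternative
-- what changed: The early-return scan loops are replaced by a set-algebra formulation: the wall check is membership of wall in the set of falling x-coordinates, and the collision check is a disjointness test between the set of shifted falling-rock cells and the set of occupied cells, with no element-by-element comparison loop.
import Mathlib
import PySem

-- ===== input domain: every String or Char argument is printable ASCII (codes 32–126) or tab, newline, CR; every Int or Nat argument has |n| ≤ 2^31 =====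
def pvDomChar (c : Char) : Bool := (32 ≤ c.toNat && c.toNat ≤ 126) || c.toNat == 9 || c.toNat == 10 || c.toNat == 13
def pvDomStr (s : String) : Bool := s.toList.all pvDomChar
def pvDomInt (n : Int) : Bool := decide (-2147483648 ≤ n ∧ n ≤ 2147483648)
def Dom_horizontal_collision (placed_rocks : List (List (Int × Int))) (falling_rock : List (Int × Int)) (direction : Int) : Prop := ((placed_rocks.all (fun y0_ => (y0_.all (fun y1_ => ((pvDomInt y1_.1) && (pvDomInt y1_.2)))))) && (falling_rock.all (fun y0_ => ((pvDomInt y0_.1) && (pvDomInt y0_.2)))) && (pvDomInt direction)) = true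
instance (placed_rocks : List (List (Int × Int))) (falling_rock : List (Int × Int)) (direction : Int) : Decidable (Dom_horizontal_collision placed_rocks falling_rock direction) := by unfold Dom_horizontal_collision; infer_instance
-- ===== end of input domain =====

-- B replaces A's early-return scan loops by set algebra: a wall-membership test
-- on the set of falling x-coordinates and a disjointness test between the
-- shifted falling-rock set and the occupied-cell set (alternative formulation).

-- ===== PORT A =====
def horizontal_collision (placed_rocks : List (List (Int × Int))) (falling_rock : List (Int × Int)) (direction : Int) : Bool :=
  let wall : Int := if direction == -1 then 1 else 7
  if falling_rock.any (fun block => block.1 == wall) then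
    true
  else
    placed_rocks.any (fun rock =>
      rock.any (fun block =>
        falling_rock.any (fun falling_block =>
          block.2 == falling_block.2 && block.1 == falling_block.1 + direction)))

-- ===== PORT B =====
def horizontal_collision_alt (placed_rocks : List (List (Int × Int))) (falling_rock : List (Int × Int)) (direction : Int) : Bool :=
  let wall : Int := if direction == -1 then 1 else 7
  if PySem.Set.contains (PySem.Set.ofList (falling_rock.map (fun fb => fb.1))) wall then
    true
  else
    let shifted : PySem.Set (Int × Int) :=
      PySem.Set.ofList (falling_rock.map (fun fb => (fb.1 + direction, fb.2)))
    let occupied : PySem.Set (Int × Int) :=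
      PySem.Set.ofList (placed_rocks.flatMap (fun rock => rock.map (fun b => (b.1, b.2))))
    !(PySem.Set.isdisjoint shifted occupied)

-- ===== PRECONDITION & SPEC =====
def Spec_horizontal_collision (placed_rocks : List (List (Int × Int))) (falling_rock : List (Int × Int)) (direction : Int) (out : Bool) : Prop := out = horizontal_collision_alt placed_rocks falling_rock direction
instance (placed_rocks : List (List (Int × Int))) (falling_rock : List (Int × Int)) (direction : Int) (out : Bool) : Decidable (Spec_horizontal_collision placed_rocks falling_rock direction out) := by unfold Spec_horizontal_collision; infer_instance

-- ===== CLAIM =====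
def Claim_equal_horizontal_collision : Prop := ∀ (placed_rocks : List (List (Int × Int))) (falling_rock : List (Int × Int)) (direction : Int), Dom_horizontal_collision placed_rocks falling_rock direction → Spec_horizontal_collision placed_rocks falling_rock direction (horizontal_collision placed_rocks falling_rock direction)

-- ===== LEMMAS AND PROOFS =====
theorem pv_wall_eq (fr : List (Int × Int)) (w : Int) :
    (fr.any fun b => b.1 == w) =
      PySem.Set.contains (PySem.Set.ofList (fr.map (fun fb => fb.1))) w := by
  apply Bool.eq_iff_iff.mpr
  simp only [List.any_eq_true, beq_iff_eq, PySem.Set.contains_iff, PySem.Set.mem_ofList,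
    List.mem_map]

theorem pv_hit_eq (pr : List (List (Int × Int))) (fr : List (Int × Int)) (d : Int) :
    (pr.any fun rock => rock.any fun block =>
        fr.any fun falling_block => block.2 == falling_block.2 && block.1 == falling_block.1 + d) =
      !(PySem.Set.isdisjoint
          (PySem.Set.ofList (fr.map (fun fb => (fb.1 + d, fb.2))))
          (PySem.Set.ofList (pr.flatMap (fun rock => rock.map (fun b => (b.1, b.2)))))) := by
  apply Bool.eq_iff_iff.mpr
  simp only [List.any_eq_true, Bool.not_eq_true', ← Bool.not_eq_true,
    PySem.Set.isdisjoint_iff, PySem.Set.mem_ofList, List.mem_map, List.mem_flatMap,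
    Bool.and_eq_true, beq_iff_eq, not_forall, not_not]
  aesop

-- ===== VERDICT =====
theorem horizontal_collision_spec : Claim_equal_horizontal_collision := by
  intro pr fr d _
  show horizontal_collision pr fr d = horizontal_collision_alt pr fr d
  simp only [horizontal_collision, horizontal_collision_alt, pv_wall_eq, pv_hit_eq]
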